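-- pv_equiv track=rewrite | github.com/MichalKowalski876/Python-misc | Transpose_cipher/code-decode_recur.py | decode_trans
-- ===== SOURCE A (Python) =====
-- def decode_trans(var, lewa=0, prawa=None, i=0, res=None):
--     if res is None:
--         res = [''] * len(var)
--         prawa = len(var) - 1
--     if lewa > prawa:
--         return ''.join(res)
--     res[lewa] = var[i]
--     i += 1
--
--     if lewa != prawa and i < len(var):
--         res[prawa] = var[i]
--         i += 1
--     return decode_trans(var, lewa + 1, prawa - 1, i, res)
-- ===== SOURCE B (Python) =====
-- def decode_trans(var, lewa=0, prawa=None, i=0, res=None):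
--     if res is None:
--         res = [''] * len(var)
--         prawa = len(var) - 1
--     if lewa > prawa:
--         return ''.join(res)
--     K = (prawa - lewa) // 2 + 1
--     for k in range(K):
--         l = lewa + k
--         p = prawa - k
--         res[l] = var[i]
--         i += 1
--         if l != p and i < len(var):
--             res[p] = var[i]
--             i += 1
--     return ''.join(res)
-- ===== Notes on version B (the rewrite author's own statement) =====
-- stated objective: alternative
-- what changed: A fills the result by recursing ~n/2 deep with the two converging pointers passed as arguments; B computes the iteration count K = (prawa-lewa)//2 + 1 up front and runs one flat counted for-loop, deriving both write positions from the loop index, with no recursion.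
import Mathlib
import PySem

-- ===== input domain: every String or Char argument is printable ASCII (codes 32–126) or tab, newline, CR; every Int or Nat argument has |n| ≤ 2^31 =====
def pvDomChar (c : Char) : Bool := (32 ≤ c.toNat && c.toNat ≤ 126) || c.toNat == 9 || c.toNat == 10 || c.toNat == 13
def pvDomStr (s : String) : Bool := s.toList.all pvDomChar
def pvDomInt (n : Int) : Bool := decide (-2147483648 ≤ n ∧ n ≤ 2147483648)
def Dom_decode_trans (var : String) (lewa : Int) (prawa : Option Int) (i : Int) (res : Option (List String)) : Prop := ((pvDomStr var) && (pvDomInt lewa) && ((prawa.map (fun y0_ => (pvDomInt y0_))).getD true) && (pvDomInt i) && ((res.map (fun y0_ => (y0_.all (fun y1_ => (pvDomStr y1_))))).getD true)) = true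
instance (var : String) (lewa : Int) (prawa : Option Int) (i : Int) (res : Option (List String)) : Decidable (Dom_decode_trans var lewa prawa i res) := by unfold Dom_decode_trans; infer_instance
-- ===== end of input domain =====

-- ===== PORT A =====
-- B changes the recursion into a single counted for-loop over precomputed iteration
-- indices (same fill order and guards); equivalence is about the RETURN value only —
-- both Pythons mutate a passed-in res list in the same way.

-- A-side helper: the recursive body for the case res ≠ None (Python's recursive calls
-- always pass a list for res and an int for prawa); errors (IndexError) return "" junk,
-- excluded by Pre_.
def decode_transGo (var : String) (lewa prawa i : Int) (res : List String) : String :=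
  if _h : lewa > prawa then PySem.Str.join "" res
  else
    match PySem.Str.pyGet? var i with
    | none => ""
    | some c =>
      match PySem.List.pySet? res lewa (String.ofList [c]) with
      | none => ""
      | some res1 =>
        if lewa ≠ prawa ∧ i + 1 < PySem.Str.len var then
          match PySem.Str.pyGet? var (i + 1) with
          | none => ""
          | some c2 =>
            match PySem.List.pySet? res1 prawa (String.ofList [c2]) with
            | none => ""
            | some res2 => decode_transGo var (lewa + 1) (prawa - 1) (i + 2) res2
        else decode_transGo var (lewa + 1) (prawa - 1) (i + 1) res1
termination_by (prawa - lewa + 1).toNat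
decreasing_by all_goals (simp only [not_lt] at _h; omega)

def decode_trans (var : String) (lewa : Int) (prawa : Option Int) (i : Int) (res : Option (List String)) : String :=
  match res with
  | none => decode_transGo var lewa (PySem.Str.len var - 1) i (List.replicate (PySem.Str.len var).toNat "")
  | some r =>
    match prawa with
    | none => ""   -- Python: TypeError ('lewa > None'); outside Pre_
    | some p => decode_transGo var lewa p i r

-- ===== PORT B =====
-- B-side: one iteration of the for-loop body; state none = an iteration raised (junk,
-- outside Pre_).
def decode_transStep (var : String) (lewa prawa : Int) (st : Option (Int × List String)) (k : Int) : Option (Int × List String) :=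
  match st with
  | none => none
  | some (i, res) =>
    let l := lewa + k
    let p := prawa - k
    match PySem.Str.pyGet? var i with
    | none => none
    | some c =>
      match PySem.List.pySet? res l (String.ofList [c]) with
      | none => none
      | some res1 =>
        if l ≠ p ∧ i + 1 < PySem.Str.len var then
          match PySem.Str.pyGet? var (i + 1) with
          | none => none
          | some c2 =>
            match PySem.List.pySet? res1 p (String.ofList [c2]) with
            | none => none
            | some res2 => some (i + 2, res2)
        else some (i + 1, res1)

def decode_transRun (var : String) (lewa prawa i : Int) (res : List String) : String :=
  if lewa > prawa then PySem.Str.join "" res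
  else
    let K := PySem.Int.floordiv (prawa - lewa) 2 + 1
    match (PySem.List.pyRange 0 K 1).foldl (decode_transStep var lewa prawa) (some (i, res)) with
    | none => ""
    | some (_, r) => PySem.Str.join "" r

def decode_trans_alt (var : String) (lewa : Int) (prawa : Option Int) (i : Int) (res : Option (List String)) : String :=
  match res with
  | none => decode_transRun var lewa (PySem.Str.len var - 1) i (List.replicate (PySem.Str.len var).toNat "")
  | some r =>
    match prawa with
    | none => ""
    | some p => decode_transRun var lewa p i r

-- ===== PRECONDITION & SPEC =====
-- Closed-form index bounds under which the run raises no IndexError: reads go at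
-- i, i+2, …; left writes at lewa, lewa+1, …; right writes at p, p-1, … down to p-last.
def decode_transPreBody (var : String) (lewa i p m : Int) : Bool :=
  let n := PySem.Str.len var
  let K := (p - lewa) / 2 + 1
  let last := if lewa + K - 1 ≠ p - K + 1 ∧ i + 2 * K - 1 ≤ n - 1 then K - 1 else K - 2
  decide ((-n ≤ i ∧ i + 2 * (K - 1) ≤ n - 1) ∧ (-m ≤ lewa ∧ lewa + K - 1 ≤ m - 1) ∧
    (last < 0 ∨ (p ≤ m - 1 ∧ -m ≤ p - last)))

def decode_transPreB (var : String) (lewa : Int) (prawa : Option Int) (i : Int) (res : Option (List String)) : Bool :=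
  match res with
  | none => decide (PySem.Str.len var - 1 < lewa) || decode_transPreBody var lewa i (PySem.Str.len var - 1) (PySem.Str.len var)
  | some r =>
    match prawa with
    | none => false
    | some p => decide (p < lewa) || decode_transPreBody var lewa i p (r.length : Int)

-- Pre_ = exactly the inputs on which the Python A returns (no TypeError from a missing
-- prawa, no IndexError from an out-of-range read or write).
def Pre_decode_trans (var : String) (lewa : Int) (prawa : Option Int) (i : Int) (res : Option (List String)) : Prop :=
  decode_transPreB var lewa prawa i res = true
instance (var : String) (lewa : Int) (prawa : Option Int) (i : Int) (res : Option (List String)) : Decidable (Pre_decode_trans var lewa prawa i res) := by unfold Pre_decode_trans; infer_instance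

def pvWitness_decode_trans : String × Int × Option Int × Int × Option (List String) := ("ab", 0, none, 0, none)

def Spec_decode_trans (var : String) (lewa : Int) (prawa : Option Int) (i : Int) (res : Option (List String)) (out : String) : Prop := out = decode_trans_alt var lewa prawa i res
instance (var : String) (lewa : Int) (prawa : Option Int) (i : Int) (res : Option (List String)) (out : String) : Decidable (Spec_decode_trans var lewa prawa i res out) := by unfold Spec_decode_trans; infer_instance

-- ===== CLAIM (what is proved, stated in full; the proofs are below) =====
def Claim_equal_decode_trans : Prop := ∀ (var : String) (lewa : Int) (prawa : Option Int) (i : Int) (res : Option (List String)), Dom_decode_trans var lewa prawa i res → Pre_decode_trans var lewa prawa i res → Spec_decode_trans var lewa prawa i res (decode_trans var lewa prawa i res)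

-- ===== LEMMAS AND PROOFS =====

-- a raised iteration stays raised through the rest of the fold
lemma decode_transStep_foldl_none (var : String) (lewa prawa : Int) (l : List Int) :
    l.foldl (decode_transStep var lewa prawa) none = none := by
  induction l with
  | nil => rfl
  | cons k l ih => simpa [decode_transStep] using ih

lemma decode_transFoldl_ext {α β : Type} (f g : α → β → α) (h : ∀ s k, f s k = g s k) :
    ∀ (l : List β) (s : α), l.foldl f s = l.foldl g s := by
  intro l
  induction l with
  | nil => intro s; rfl
  | cons x xs ih => intro s; rw [List.foldl_cons, List.foldl_cons, h, ih]

-- shifting the loop counter by one = shifting the two pointers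
lemma decode_transStep_shift (var : String) (lewa prawa : Int) (st : Option (Int × List String)) (k : Int) :
    decode_transStep var lewa prawa st (1 + k) = decode_transStep var (lewa + 1) (prawa - 1) st k := by
  cases st with
  | none => rfl
  | some p =>
    obtain ⟨i, res⟩ := p
    have h1 : lewa + (1 + k) = lewa + 1 + k := by ring
    have h2 : prawa - (1 + k) = prawa - 1 - k := by ring
    simp only [decode_transStep, h1, h2]

lemma decode_transRun_fold_shift (var : String) (lewa prawa b : Int) (st : Option (Int × List String)) :
    (PySem.List.pyRange 1 (b + 1) 1).foldl (decode_transStep var lewa prawa) st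
      = (PySem.List.pyRange 0 b 1).foldl (decode_transStep var (lewa + 1) (prawa - 1)) st := by
  rw [PySem.List.pyRange_one 1 (b + 1), PySem.List.pyRange_one 0 b]
  have hlen : (b + 1 - 1).toNat = (b - 0).toNat := by omega
  rw [hlen, List.foldl_map, List.foldl_map]
  refine decode_transFoldl_ext _ _ (fun s k => ?_) _ _
  rw [show ((0 : Int) + (k : Int)) = (k : Int) by ring]
  exact decode_transStep_shift var lewa prawa s k

-- the main equivalence: A's recursion = B's counted fold, for the exact iteration count
lemma decode_transGo_eq_fold (n : Nat) : ∀ (var : String) (lewa prawa i : Int) (res : List String),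
    (prawa - lewa = 2 * (n : Int) ∨ prawa - lewa = 2 * (n : Int) + 1) →
    decode_transGo var lewa prawa i res =
      (match (PySem.List.pyRange 0 ((n : Int) + 1) 1).foldl (decode_transStep var lewa prawa) (some (i, res)) with
       | none => ""
       | some (_, r) => PySem.Str.join "" r) := by
  induction n with
  | zero =>
    intro var lewa prawa i res h
    simp only [Nat.cast_zero] at h ⊢
    have hle : ¬ lewa > prawa := by omega
    rw [PySem.List.pyRange_one_cons (by norm_num : (0:Int) < 0 + 1)]
    have hnil : PySem.List.pyRange (0 + 1) ((0:Int) + 1) 1 = [] := PySem.List.pyRange_one_eq_nil (by norm_num)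
    rw [decode_transGo]
    simp only [dif_neg hle]
    rw [List.foldl_cons, hnil]
    simp only [decode_transStep, add_zero, sub_zero]
    cases hg : PySem.Str.pyGet? var i with
    | none => rfl
    | some c =>
      dsimp only
      cases hs : PySem.List.pySet? res lewa (String.ofList [c]) with
      | none => rfl
      | some res1 =>
        dsimp only
        by_cases hcond : lewa ≠ prawa ∧ i + 1 < PySem.Str.len var
        · rw [if_pos hcond, if_pos hcond]
          cases hg2 : PySem.Str.pyGet? var (i + 1) with
          | none => rfl
          | some c2 =>
            dsimp only
            cases hs2 : PySem.List.pySet? res1 prawa (String.ofList [c2]) with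
            | none => rfl
            | some res2 =>
              dsimp only [List.foldl_nil]
              rw [decode_transGo]
              have hstop : lewa + 1 > prawa - 1 := by omega
              simp only [dif_pos hstop]
        · rw [if_neg hcond, if_neg hcond]
          dsimp only [List.foldl_nil]
          rw [decode_transGo]
          have hstop : lewa + 1 > prawa - 1 := by omega
          simp only [dif_pos hstop]
  | succ m ih =>
    intro var lewa prawa i res h
    push_cast at h
    have hle : ¬ lewa > prawa := by omega
    have hrec : prawa - 1 - (lewa + 1) = 2 * (m : Int) ∨ prawa - 1 - (lewa + 1) = 2 * (m : Int) + 1 := by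
      omega
    have hcast : ((Nat.succ m : Nat) : Int) + 1 = ((m : Int) + 1) + 1 := by push_cast; ring
    rw [hcast, PySem.List.pyRange_one_cons (by positivity : (0:Int) < (m : Int) + 1 + 1)]
    rw [decode_transGo]
    simp only [dif_neg hle]
    rw [List.foldl_cons]
    simp only [decode_transStep, add_zero, sub_zero]
    cases hg : PySem.Str.pyGet? var i with
    | none => rw [decode_transStep_foldl_none]
    | some c =>
      dsimp only
      cases hs : PySem.List.pySet? res lewa (String.ofList [c]) with
      | none => rw [decode_transStep_foldl_none]
      | some res1 =>
        dsimp only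
        by_cases hcond : lewa ≠ prawa ∧ i + 1 < PySem.Str.len var
        · rw [if_pos hcond, if_pos hcond]
          cases hg2 : PySem.Str.pyGet? var (i + 1) with
          | none => rw [decode_transStep_foldl_none]
          | some c2 =>
            dsimp only
            cases hs2 : PySem.List.pySet? res1 prawa (String.ofList [c2]) with
            | none => rw [decode_transStep_foldl_none]
            | some res2 =>
              dsimp only
              rw [show ((0:Int) + 1) = (1:Int) by norm_num]
              rw [decode_transRun_fold_shift var lewa prawa ((m : Int) + 1)]
              exact ih var (lewa + 1) (prawa - 1) (i + 2) res2 hrec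
        · rw [if_neg hcond, if_neg hcond]
          rw [show ((0:Int) + 1) = (1:Int) by norm_num]
          rw [decode_transRun_fold_shift var lewa prawa ((m : Int) + 1)]
          exact ih var (lewa + 1) (prawa - 1) (i + 1) res1 hrec

-- A's recursion agrees with B's loop on every (also junk) state
lemma decode_transGo_eq_run (var : String) (lewa prawa i : Int) (res : List String) :
    decode_transGo var lewa prawa i res = decode_transRun var lewa prawa i res := by
  by_cases hgt : lewa > prawa
  · rw [decode_transGo, decode_transRun]
    simp only [dif_pos hgt, if_pos hgt]
  · have hd : prawa - lewa = 2 * (((prawa - lewa) / 2).toNat : Int)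
        ∨ prawa - lewa = 2 * (((prawa - lewa) / 2).toNat : Int) + 1 := by omega
    have hfd : PySem.Int.floordiv (prawa - lewa) 2 = (prawa - lewa) / 2 := by
      unfold PySem.Int.floordiv
      rw [Int.fdiv_eq_ediv]
      norm_num
    have hK : PySem.Int.floordiv (prawa - lewa) 2 + 1 = ((((prawa - lewa) / 2).toNat : Int)) + 1 := by
      rw [hfd]; omega
    rw [decode_transRun]
    simp only [if_neg hgt]
    rw [hK]
    exact decode_transGo_eq_fold ((prawa - lewa) / 2).toNat var lewa prawa i res hd

-- ===== VERDICT (by name: the statement is the Claim_ definition above) =====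
theorem decode_trans_spec : Claim_equal_decode_trans := by
  intro var lewa prawa i res _hdom _hpre
  unfold Spec_decode_trans decode_trans decode_trans_alt
  cases res with
  | none => exact decode_transGo_eq_run var lewa (PySem.Str.len var - 1) i _
  | some r =>
    cases prawa with
    | none => rfl
    | some p => exact decode_transGo_eq_run var lewa p i r
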